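-- pv_equiv track=rewrite | github.com/fresko678/security | ANF.py | anf_coeffs
-- ===== SOURCE A (Python) =====
-- def anf_coeffs(truthvalues) -> list:
--     s = '{0:b}'.format(len(truthvalues))
--     n = len(s) - 1
--
--     if len(truthvalues) != 2 ** n:
--         raise ValueError("The number of truth values must be a power of two, "
--                          "got %d" % len(truthvalues))
--
--     coeffs = [[v] for v in truthvalues]
--
--     for i in range(n):
--         tmp = []
--         for j in range(2 ** (n - i - 1)):
--             tmp.append(coeffs[2 * j] +
--                        list(map(lambda x, y: x ^ y, coeffs[2 * j], coeffs[2 * j + 1])))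
--         coeffs = tmp
--
--     return coeffs[0]
-- ===== SOURCE B (Python) =====
-- def anf_coeffs(truthvalues) -> list:
--     s = '{0:b}'.format(len(truthvalues))
--     n = len(s) - 1
--
--     if len(truthvalues) != 2 ** n:
--         raise ValueError("The number of truth values must be a power of two, "
--                          "got %d" % len(truthvalues))
--
--     a = list(truthvalues)
--     i = 1
--     while i < len(a):
--         for j in range(len(a)):
--             if j & i:
--                 a[j] ^= a[j ^ i]
--         i <<= 1
--     return a
-- ===== Notes on version B (the rewrite author's own statement) =====
-- stated objective: alternative
-- what changed: Replaces the list-of-lists bottom-up pairwise merging (building each level as concatenations of blocks) by the classic in-place fast Moebius/XOR butterfly over one flat array with bit-mask indexing (a[j] ^= a[j^i] for each power-of-two mask i).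
import Mathlib
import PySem

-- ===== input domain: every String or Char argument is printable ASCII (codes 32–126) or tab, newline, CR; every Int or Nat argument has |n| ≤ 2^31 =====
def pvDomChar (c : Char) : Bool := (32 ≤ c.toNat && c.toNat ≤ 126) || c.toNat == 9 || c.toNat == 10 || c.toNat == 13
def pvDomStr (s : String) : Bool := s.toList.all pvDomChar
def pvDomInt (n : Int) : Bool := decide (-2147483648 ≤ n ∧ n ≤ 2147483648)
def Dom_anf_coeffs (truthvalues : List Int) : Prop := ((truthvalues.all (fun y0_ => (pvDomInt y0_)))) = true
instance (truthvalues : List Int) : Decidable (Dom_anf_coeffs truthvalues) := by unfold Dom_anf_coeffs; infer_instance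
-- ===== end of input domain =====

-- B replaces A's list-of-lists bottom-up pairwise merging by the in-place fast Moebius/XOR
-- butterfly over one flat array (a[j] ^= a[j^i] for power-of-two masks i); same cost class,
-- genuinely different data structure and traversal ("alternative").

-- ===== PORT A =====

-- '{0:b}'.format(m): the binary digits of m, kept as the string's character list
-- (Python's str is only used through len(s) here).
def pyBinDigits (m : Nat) : List Char :=
  if h : m = 0 then [] else pyBinDigits (m / 2) ++ [if m % 2 = 1 then '1' else '0']
termination_by m
decreasing_by exact Nat.div_lt_self (Nat.pos_of_ne_zero h) (by norm_num)

def pyBinStr (m : Nat) : List Char := if m = 0 then ['0'] else pyBinDigits m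

-- literal transliteration of A; the ValueError branch returns [] (excluded by Pre_anf_coeffs);
-- list indexing coeffs[2*j], coeffs[2*j+1], coeffs[0] is always in range under Pre_, ported
-- with the total getD _ [].
def anf_coeffs (truthvalues : List Int) : List Int :=
  let s := pyBinStr truthvalues.length
  let n := s.length - 1
  if truthvalues.length ≠ 2 ^ n then
    []  -- raise ValueError("The number of truth values must be a power of two, got %d")
  else
    let coeffs := truthvalues.map (fun v => [v])
    let final := (List.range n).foldl (fun coeffs i =>
      (List.range (2 ^ (n - i - 1))).foldl (fun tmp j =>
        tmp ++ [coeffs.getD (2 * j) [] ++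
          List.zipWith PySem.Int.bxor (coeffs.getD (2 * j) []) (coeffs.getD (2 * j + 1) [])]) []) coeffs
    final.getD 0 []

-- ===== PORT B =====

-- body of B's inner 'for j in range(len(a)): if j & i: a[j] ^= a[j ^ i]'
def altStep (i : Nat) (b : List Int) (j : Nat) : List Int :=
  if j &&& i ≠ 0 then b.set j (PySem.Int.bxor (b.getD j 0) (b.getD (j ^^^ i) 0)) else b

def altRound (a : List Int) (i : Nat) : List Int := (List.range a.length).foldl (altStep i) a

theorem foldl_altStep_length (i : Nat) (l : List Nat) (b : List Int) :
    (l.foldl (altStep i) b).length = b.length := by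
  induction l generalizing b with
  | nil => rfl
  | cons j t ih => rw [List.foldl_cons, ih]; unfold altStep; split <;> simp

theorem altRound_length (a : List Int) (i : Nat) : (altRound a i).length = a.length :=
  foldl_altStep_length i _ a

-- B's 'i = 1; while i < len(a): …; i <<= 1' — the mask i is carried as its exponent k (i = 2^k,
-- i <<= 1 becomes k+1); the loop terminates because the mask doubles while len(a) is fixed.
def altLoop (a : List Int) (k : Nat) : List Int :=
  if h : 2 ^ k < a.length then altLoop (altRound a (2 ^ k)) (k + 1) else a
termination_by a.length - 2 ^ k
decreasing_by
  rw [altRound_length]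
  have h2 : 2 ^ k < 2 ^ (k + 1) := Nat.pow_lt_pow_succ (by norm_num)
  omega

-- literal transliteration of B (validation identical to A's by design; main pass differs)
def anf_coeffs_alt (truthvalues : List Int) : List Int :=
  let s := pyBinStr truthvalues.length
  let n := s.length - 1
  if truthvalues.length ≠ 2 ^ n then
    []  -- raise ValueError("The number of truth values must be a power of two, got %d")
  else altLoop truthvalues 0

-- ===== PRECONDITION & SPEC =====
-- Pre_ excludes exactly the inputs whose length is not a power of two (including the empty
-- list), on which the Python A raises ValueError.
def Pre_anf_coeffs (truthvalues : List Int) : Prop :=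
  truthvalues ≠ [] ∧ truthvalues.length = 2 ^ (Nat.log2 truthvalues.length)
instance (truthvalues : List Int) : Decidable (Pre_anf_coeffs truthvalues) := by
  unfold Pre_anf_coeffs; infer_instance

def pvWitness_anf_coeffs : List Int := [1, 0, 1, 1]

def Spec_anf_coeffs (truthvalues : List Int) (out : List Int) : Prop := out = anf_coeffs_alt truthvalues
instance (truthvalues : List Int) (out : List Int) : Decidable (Spec_anf_coeffs truthvalues out) := by
  unfold Spec_anf_coeffs; infer_instance

-- ===== CLAIM (what is proved, stated in full; the proofs are below) =====
def Claim_equal_anf_coeffs : Prop := ∀ (truthvalues : List Int), Dom_anf_coeffs truthvalues → Pre_anf_coeffs truthvalues → Spec_anf_coeffs truthvalues (anf_coeffs truthvalues)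

-- ===== LEMMAS AND PROOFS =====

-- the reference function both main passes are reduced to: the recursive (top-down) XOR transform
def anfRef (a : List Int) : List Int :=
  if a.length ≤ 1 then a
  else
    let L := anfRef (a.take (a.length / 2))
    let R := anfRef (a.drop (a.length / 2))
    L ++ List.zipWith PySem.Int.bxor L R
termination_by a.length
decreasing_by
  · simp only [List.length_take]; omega
  · simp only [List.length_drop]; omega

-- ---- generic bit lemmas ----

theorem xor_two_pow_of_testBit_false (k : Nat) :
    ∀ x : Nat, x.testBit k = false → x ^^^ 2 ^ k = x + 2 ^ k := by
  induction k with
  | zero =>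
    intro x h
    have hx : Even x := by
      simp only [Nat.testBit_zero, decide_eq_false_iff_not] at h
      rw [Nat.even_iff]; omega
    simpa using Nat.xor_one_of_even hx
  | succ k ih =>
    intro x h
    have hbit : Nat.bit (x.testBit 0) (x >>> 1) = x := Nat.bit_testBit_zero_shiftRight_one x
    have h2 : (2 : Nat) ^ (k + 1) = Nat.bit false (2 ^ k) := by
      simp [Nat.bit_false_apply, Nat.pow_succ, Nat.mul_comm]
    have hm : (x >>> 1).testBit k = false := by
      rwa [Nat.shiftRight_one, ← Nat.testBit_add_one]
    calc x ^^^ 2 ^ (k + 1)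
        = Nat.bit (x.testBit 0) (x >>> 1) ^^^ Nat.bit false (2 ^ k) := by rw [hbit, ← h2]
      _ = Nat.bit (bne (x.testBit 0) false) ((x >>> 1) ^^^ 2 ^ k) := Nat.xor_bit ..
      _ = Nat.bit (x.testBit 0) ((x >>> 1) + 2 ^ k) := by rw [ih _ hm]; cases x.testBit 0 <;> rfl
      _ = x + 2 ^ (k + 1) := by
          rw [Nat.bit_val, Nat.shiftRight_one] at hbit ⊢
          rw [Nat.pow_succ]
          omega

theorem and_two_pow_ne_zero (j k : Nat) : (j &&& 2 ^ k ≠ 0) ↔ j.testBit k = true := by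
  rw [Nat.and_two_pow]
  cases h : j.testBit k <;> simp

theorem testBit_xor_two_pow_self (t k : Nat) : (t ^^^ 2 ^ k).testBit k = !t.testBit k := by
  simp [Nat.testBit_xor, Nat.testBit_two_pow_self]

theorem xor_two_pow_lt (t k : Nat) (h : t.testBit k = true) : (t ^^^ 2 ^ k) + 2 ^ k = t := by
  have hb : (t ^^^ 2 ^ k).testBit k = false := by rw [testBit_xor_two_pow_self, h]; rfl
  have := xor_two_pow_of_testBit_false k (t ^^^ 2 ^ k) hb
  rw [Nat.xor_xor_cancel_right] at this
  omega

-- ---- getD helpers ----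

theorem getD_append_left (x y : List Int) (j : Nat) (h : j < x.length) :
    (x ++ y).getD j 0 = x.getD j 0 := by
  simp [List.getD_eq_getElem?_getD, List.getElem?_append_left h]

theorem getD_append_right (x y : List Int) (j : Nat) (h : x.length ≤ j) :
    (x ++ y).getD j 0 = y.getD (j - x.length) 0 := by
  simp [List.getD_eq_getElem?_getD, List.getElem?_append_right h]

theorem ext_getD (l1 l2 : List Int) (hl : l1.length = l2.length)
    (h : ∀ j, j < l1.length → l1.getD j 0 = l2.getD j 0) : l1 = l2 := by
  apply List.ext_getElem hl
  intro i h1 h2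
  have := h i h1
  rwa [List.getD_eq_getElem?_getD, List.getD_eq_getElem?_getD,
    List.getElem?_eq_getElem h1, List.getElem?_eq_getElem h2] at this

-- ---- the butterfly round, pointwise ----

theorem foldl_altStep_getD (k : Nat) (a : List Int) :
    ∀ t, t ≤ a.length → ∀ j, j < a.length →
      ((List.range t).foldl (altStep (2 ^ k)) a).getD j 0 =
        if j < t ∧ j.testBit k then
          PySem.Int.bxor (a.getD j 0) (a.getD (j ^^^ 2 ^ k) 0)
        else a.getD j 0 := by
  intro t
  induction t with
  | zero => intro _ j hj; simp
  | succ t ih =>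
    intro ht j hj
    have ht' : t ≤ a.length := by omega
    rw [List.range_succ, List.foldl_append, List.foldl_cons, List.foldl_nil]
    set b := (List.range t).foldl (altStep (2 ^ k)) a with hb
    have hblen : b.length = a.length := foldl_altStep_length _ _ _
    by_cases htb : t.testBit k
    · have hand : t &&& 2 ^ k ≠ 0 := (and_two_pow_ne_zero t k).mpr htb
      have hbt : b.getD t 0 = a.getD t 0 := by
        rw [ih ht' t (by omega)]; simp
      have hu : (t ^^^ 2 ^ k).testBit k = false := by rw [testBit_xor_two_pow_self, htb]; rfl
      have hulttop : (t ^^^ 2 ^ k) + 2 ^ k = t := xor_two_pow_lt t k htb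
      have hult : t ^^^ 2 ^ k < a.length := by have := Nat.two_pow_pos k; omega
      have hbu : b.getD (t ^^^ 2 ^ k) 0 = a.getD (t ^^^ 2 ^ k) 0 := by
        rw [ih ht' _ hult]; simp [hu]
      rw [altStep, if_pos hand, hbt, hbu]
      rw [List.getD_eq_getElem?_getD, List.getElem?_set]
      by_cases hjt : t = j
      · subst hjt
        rw [if_pos rfl, if_pos (hblen ▸ hj), Option.getD_some, if_pos ⟨by omega, htb⟩]
      · rw [if_neg hjt, ← List.getD_eq_getElem?_getD, ih ht' j hj]
        by_cases hc : j.testBit k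
        · by_cases hjlt : j < t
          · rw [if_pos ⟨hjlt, hc⟩, if_pos ⟨by omega, hc⟩]
          · rw [if_neg (fun h => hjlt h.1), if_neg (fun h => hjt (by omega))]
        · simp [hc]
    · have htb' : t.testBit k = false := by simpa using htb
      have hand : ¬ (t &&& 2 ^ k ≠ 0) := by simp [and_two_pow_ne_zero, htb']
      rw [altStep, if_neg hand, ih ht' j hj]
      by_cases hc : j.testBit k
      · by_cases hjlt : j < t
        · rw [if_pos ⟨hjlt, hc⟩, if_pos ⟨by omega, hc⟩]
        · have hjne : j ≠ t := fun e => htb (e ▸ hc)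
          rw [if_neg (fun h => hjlt h.1), if_neg (fun h => hjne (by omega))]
      · simp [hc]

theorem altRound_getD (k : Nat) (a : List Int) (j : Nat) (hj : j < a.length) :
    (altRound a (2 ^ k)).getD j 0 =
      if j.testBit k then PySem.Int.bxor (a.getD j 0) (a.getD (j ^^^ 2 ^ k) 0)
      else a.getD j 0 := by
  have := foldl_altStep_getD k a a.length le_rfl j hj
  rw [altRound, this]
  simp [hj]

theorem decomp_xor (p j' : Nat) (h : j' < 2 ^ p) : j' ^^^ 2 ^ p = 2 ^ p + j' := by
  rw [xor_two_pow_of_testBit_false p j' (Nat.testBit_lt_two_pow h)]; omega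

theorem altRound_append_small (p k : Nat) (hk : k < p) (x y : List Int)
    (hx : x.length = 2 ^ p) (hy : y.length = 2 ^ p) :
    altRound (x ++ y) (2 ^ k) = altRound x (2 ^ k) ++ altRound y (2 ^ k) := by
  have hlen : (x ++ y).length = 2 ^ p + 2 ^ p := by simp [hx, hy]
  have h2k : (2 : Nat) ^ k < 2 ^ p := Nat.pow_lt_pow_right (by norm_num) hk
  apply ext_getD
  · simp [altRound_length, hx, hy]
  intro j hj
  rw [altRound_length, hlen] at hj
  rw [altRound_getD k (x ++ y) j (by omega)]
  by_cases hjx : j < 2 ^ p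
  · have hR : (altRound x (2 ^ k) ++ altRound y (2 ^ k)).getD j 0
        = (altRound x (2 ^ k)).getD j 0 :=
      getD_append_left _ _ j (by rw [altRound_length]; omega)
    have hL1 : (x ++ y).getD j 0 = x.getD j 0 := getD_append_left x y j (by omega)
    rw [hR, altRound_getD k x j (by omega), hL1]
    by_cases hc : j.testBit k
    · have hlt : j ^^^ 2 ^ k < 2 ^ p := Nat.xor_lt_two_pow hjx h2k
      have hL2 : (x ++ y).getD (j ^^^ 2 ^ k) 0 = x.getD (j ^^^ 2 ^ k) 0 :=
        getD_append_left x y _ (by omega)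
      rw [if_pos hc, if_pos hc, hL2]
    · rw [if_neg hc, if_neg hc]
  · -- second half
    have hj' : j - 2 ^ p < 2 ^ p := by omega
    set j' := j - 2 ^ p with hj'def
    have hjd : j = 2 ^ p + j' := by omega
    have hdecomp : j' ^^^ 2 ^ p = j := by rw [decomp_xor p j' hj']; omega
    have htb : j.testBit k = j'.testBit k := by
      rw [← hdecomp, Nat.testBit_xor, Nat.testBit_two_pow]
      simp [Nat.ne_of_gt hk]
    have hxlt : j' ^^^ 2 ^ k < 2 ^ p := Nat.xor_lt_two_pow hj' h2k
    have hxor : j ^^^ 2 ^ k = 2 ^ p + (j' ^^^ 2 ^ k) := by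
      rw [← hdecomp, Nat.xor_right_comm, decomp_xor p _ hxlt]
    have hR : (altRound x (2 ^ k) ++ altRound y (2 ^ k)).getD j 0
        = (altRound y (2 ^ k)).getD (j - (altRound x (2 ^ k)).length) 0 :=
      getD_append_right _ _ j (by rw [altRound_length]; omega)
    rw [altRound_length, hx, ← hj'def] at hR
    have hL1 : (x ++ y).getD j 0 = y.getD j' 0 := by
      rw [getD_append_right x y j (by omega), hx]
    rw [hR, altRound_getD k y j' (by omega), hL1]
    by_cases hc : j'.testBit k
    · have hL2 : (x ++ y).getD (j ^^^ 2 ^ k) 0 = y.getD (j' ^^^ 2 ^ k) 0 := by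
        rw [hxor, getD_append_right x y _ (by omega), hx, Nat.add_sub_cancel_left]
      rw [if_pos (htb ▸ hc), if_pos hc, hL2]
    · rw [if_neg (by rw [htb]; exact hc), if_neg hc]

theorem altRound_append_top (p : Nat) (x y : List Int)
    (hx : x.length = 2 ^ p) (hy : y.length = 2 ^ p) :
    altRound (x ++ y) (2 ^ p) = x ++ List.zipWith PySem.Int.bxor x y := by
  have hzlen : (List.zipWith PySem.Int.bxor x y).length = 2 ^ p := by
    simp [hx, hy]
  apply ext_getD
  · simp [altRound_length, hx, hy, hzlen]
  intro j hj
  rw [altRound_length, List.length_append, hx, hy] at hj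
  rw [altRound_getD p (x ++ y) j (by simp [hx, hy]; omega)]
  by_cases hjx : j < 2 ^ p
  · rw [if_neg (by simp [Nat.testBit_lt_two_pow hjx]),
      getD_append_left x y j (by omega), getD_append_left _ _ j (by omega)]
  · have hj' : j - 2 ^ p < 2 ^ p := by omega
    set j' := j - 2 ^ p with hj'def
    have hdecomp : j' ^^^ 2 ^ p = j := by rw [decomp_xor p j' hj']; omega
    have htb : j.testBit p = true := by
      rw [← hdecomp, Nat.testBit_xor, Nat.testBit_lt_two_pow hj', Nat.testBit_two_pow_self]
      rfl
    have hxor : j ^^^ 2 ^ p = j' := by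
      rw [← hdecomp, Nat.xor_assoc, Nat.xor_self, Nat.xor_zero]
    have hL1 : (x ++ y).getD j 0 = y.getD j' 0 := by
      rw [getD_append_right x y j (by omega), hx]
    have hL2 : (x ++ y).getD j' 0 = x.getD j' 0 := getD_append_left x y j' (by omega)
    have hR : (x ++ List.zipWith PySem.Int.bxor x y).getD j 0
        = (List.zipWith PySem.Int.bxor x y).getD (j - x.length) 0 :=
      getD_append_right _ _ j (by omega)
    rw [if_pos htb, hxor, hL1, hL2, hR, hx, ← hj'def]
    have h1 : y.getD j' 0 = y[j']'(by omega) := y.getD_eq_getElem 0 (by omega)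
    have h2 : x.getD j' 0 = x[j']'(by omega) := x.getD_eq_getElem 0 (by omega)
    have h3 : (List.zipWith PySem.Int.bxor x y).getD j' 0
        = (List.zipWith PySem.Int.bxor x y)[j']'(by omega) :=
      (List.zipWith PySem.Int.bxor x y).getD_eq_getElem 0 (by omega)
    rw [h1, h2, h3, List.getElem_zipWith, PySem.Int.bxor_comm]

-- ---- B's loop = anfRef ----

theorem rounds_append (p : Nat) (l : List Nat) (hl : ∀ t ∈ l, t < p) :
    ∀ x y : List Int, x.length = 2 ^ p → y.length = 2 ^ p →
    l.foldl (fun b t => altRound b (2 ^ t)) (x ++ y) =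
      l.foldl (fun b t => altRound b (2 ^ t)) x ++ l.foldl (fun b t => altRound b (2 ^ t)) y := by
  induction l with
  | nil => intros; rfl
  | cons t l ih =>
    intro x y hx hy
    simp only [List.foldl_cons]
    rw [altRound_append_small p t (hl t (by simp)) x y hx hy]
    exact ih (fun u hu => hl u (by simp [hu])) _ _
      (by rw [altRound_length, hx]) (by rw [altRound_length, hy])

theorem altLoop_eq (d : Nat) : ∀ (k : Nat) (a : List Int), a.length = 2 ^ (k + d) →
    altLoop a k = (List.range' k d).foldl (fun b t => altRound b (2 ^ t)) a := by
  induction d with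
  | zero =>
    intro k a h
    rw [altLoop]
    simp [h]
  | succ d ih =>
    intro k a h
    have hg : 2 ^ k < a.length := by
      rw [h]; exact Nat.pow_lt_pow_right (by norm_num) (by omega)
    rw [altLoop, dif_pos hg,
      ih (k + 1) _ (by rw [altRound_length, h]; congr 1; omega),
      List.range'_succ, List.foldl_cons]

theorem anfRef_length (n : Nat) : ∀ a : List Int, a.length = 2 ^ n → (anfRef a).length = 2 ^ n := by
  induction n with
  | zero => intro a h; rw [anfRef, if_pos (by omega)]; exact h
  | succ n ih =>
    intro a h
    have h2 : (2 : Nat) ^ n ≥ 1 := Nat.one_le_two_pow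
    rw [anfRef, if_neg (by rw [h, Nat.pow_succ]; omega)]
    have hL : (a.take (a.length / 2)).length = 2 ^ n := by
      simp only [List.length_take, h, Nat.pow_succ]; omega
    have hR : (a.drop (a.length / 2)).length = 2 ^ n := by
      simp only [List.length_drop, h, Nat.pow_succ]; omega
    simp only [List.length_append, List.length_zipWith, ih _ hL, ih _ hR, Nat.pow_succ]
    omega

theorem anfRef_two_pow (n : Nat) (x y : List Int) (hx : x.length = 2 ^ n) (hy : y.length = 2 ^ n) :
    anfRef (x ++ y) = anfRef x ++ List.zipWith PySem.Int.bxor (anfRef x) (anfRef y) := by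
  have h2 : (2 : Nat) ^ n ≥ 1 := Nat.one_le_two_pow
  have hlen : (x ++ y).length = 2 ^ (n + 1) := by
    simp [hx, hy, Nat.pow_succ]; omega
  rw [anfRef, if_neg (by rw [hlen, Nat.pow_succ]; omega)]
  have hhalf : (x ++ y).length / 2 = x.length := by rw [hlen, Nat.pow_succ, hx]; omega
  rw [hhalf, List.take_left, List.drop_left]

theorem B_eq_ref : ∀ (n : Nat) (a : List Int), a.length = 2 ^ n →
    (List.range n).foldl (fun b t => altRound b (2 ^ t)) a = anfRef a := by
  intro n
  induction n with
  | zero =>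
    intro a h
    rw [List.range_zero, List.foldl_nil, anfRef, if_pos (by omega)]
  | succ n ih =>
    intro a h
    have h2 : (2 : Nat) ^ n ≥ 1 := Nat.one_le_two_pow
    have hx : (a.take (2 ^ n)).length = 2 ^ n := by
      simp only [List.length_take, h, Nat.pow_succ]; omega
    have hy : (a.drop (2 ^ n)).length = 2 ^ n := by
      simp only [List.length_drop, h, Nat.pow_succ]; omega
    have hxy : a = a.take (2 ^ n) ++ a.drop (2 ^ n) := (List.take_append_drop _ _).symm
    rw [List.range_succ, List.foldl_append, List.foldl_cons, List.foldl_nil]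
    conv_lhs => rw [hxy]
    rw [rounds_append n (List.range n) (by simp) _ _ hx hy, ih _ hx, ih _ hy,
      altRound_append_top n _ _ (by rw [anfRef_length n _ hx]) (by rw [anfRef_length n _ hy])]
    conv_rhs => rw [hxy]
    rw [anfRef_two_pow n _ _ hx hy]

-- ---- A's loop = anfRef ----

def pairMerge : List (List Int) → List (List Int)
  | x :: y :: rest => (x ++ List.zipWith PySem.Int.bxor x y) :: pairMerge rest
  | _ => []

theorem pairMerge_length : ∀ c : List (List Int), (pairMerge c).length = c.length / 2
  | [] => rfl
  | [_] => by simp [pairMerge]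
  | _ :: _ :: rest => by
    simp only [pairMerge, List.length_cons, pairMerge_length rest]
    omega

theorem pairMerge_append : ∀ (c d : List (List Int)), c.length % 2 = 0 →
    pairMerge (c ++ d) = pairMerge c ++ pairMerge d
  | [], d, _ => by simp [pairMerge]
  | [x], _, h => by simp at h
  | x :: y :: rest, d, h => by
    simp only [List.cons_append, pairMerge, List.length_cons] at *
    rw [pairMerge_append rest d (by omega)]

theorem inner_eq_pairMerge : ∀ (r : Nat) (c : List (List Int)), c.length = 2 * r →
    (List.range r).foldl (fun tmp j =>
      tmp ++ [c.getD (2 * j) [] ++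
        List.zipWith PySem.Int.bxor (c.getD (2 * j) []) (c.getD (2 * j + 1) [])]) [] =
      pairMerge c := by
  intro r
  induction r with
  | zero =>
    intro c hc
    have : c = [] := List.eq_nil_of_length_eq_zero (by omega)
    subst this; rfl
  | succ r ih =>
    intro c hc
    match c, hc with
    | x :: y :: rest, hc =>
      rw [PySem.List.foldl_append_singleton_eq_map, List.nil_append,
        List.range_succ_eq_map, List.map_cons, List.map_map]
      have h0 : (x :: y :: rest).getD 0 [] = x := rfl
      have h1 : (x :: y :: rest).getD 1 [] = y := rfl
      simp only [Nat.mul_zero, h0, Nat.mul_zero, h1]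
      rw [pairMerge]
      congr 1
      rw [← ih rest (by simp only [List.length_cons] at hc; omega), PySem.List.foldl_append_singleton_eq_map,
        List.nil_append]
      apply List.map_congr_left
      intro j _
      simp only [Function.comp_apply,
        show ∀ j : Nat, 2 * Nat.succ j = 2 * j + 1 + 1 from fun j => by omega,
        List.getD_cons_succ]

theorem pairMerge_iter_append : ∀ (k m : Nat) (c d : List (List Int)),
    c.length = 2 ^ (k + m) →
    pairMerge^[k] (c ++ d) = pairMerge^[k] c ++ pairMerge^[k] d := by
  intro k
  induction k with
  | zero => intros; rfl
  | succ k ih =>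
    intro m c d hc
    rw [Function.iterate_succ_apply, Function.iterate_succ_apply, Function.iterate_succ_apply,
      pairMerge_append c d (by rw [hc, show k + 1 + m = (k + m) + 1 by omega, Nat.pow_succ]; omega)]
    exact ih m _ _ (by rw [pairMerge_length, hc]; rw [show k + 1 + m = (k + m) + 1 by omega, Nat.pow_succ]; omega)

theorem pairMerge_iter_length : ∀ (k m : Nat) (c : List (List Int)), c.length = 2 ^ (k + m) →
    (pairMerge^[k] c).length = 2 ^ m := by
  intro k
  induction k with
  | zero => intro m c h; simpa using h
  | succ k ih =>
    intro m c hc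
    rw [Function.iterate_succ_apply]
    exact ih m _ (by rw [pairMerge_length, hc, show k + 1 + m = (k + m) + 1 by omega, Nat.pow_succ]; omega)

theorem pairMerge_iter_ref : ∀ (n : Nat) (a : List Int), a.length = 2 ^ n →
    pairMerge^[n] (a.map (fun v => [v])) = [anfRef a] := by
  intro n
  induction n with
  | zero =>
    intro a h
    obtain ⟨v, rfl⟩ := List.length_eq_one_iff.mp (by simpa using h)
    rw [Function.iterate_zero_apply, anfRef]
    rfl
  | succ n ih =>
    intro a h
    have h2 : (2 : Nat) ^ n ≥ 1 := Nat.one_le_two_pow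
    have hx : (a.take (2 ^ n)).length = 2 ^ n := by
      simp only [List.length_take, h, Nat.pow_succ]; omega
    have hy : (a.drop (2 ^ n)).length = 2 ^ n := by
      simp only [List.length_drop, h, Nat.pow_succ]; omega
    have hxy : a = a.take (2 ^ n) ++ a.drop (2 ^ n) := (List.take_append_drop _ _).symm
    conv_lhs => rw [hxy]
    rw [List.map_append, Function.iterate_succ_apply',
      pairMerge_iter_append n 0 _ _ (by simpa using hx),
      ih _ hx, ih _ hy]
    show pairMerge [anfRef (a.take (2 ^ n)), anfRef (a.drop (2 ^ n))] = _
    rw [show pairMerge [anfRef (a.take (2 ^ n)), anfRef (a.drop (2 ^ n))]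
        = [anfRef (a.take (2 ^ n)) ++
            List.zipWith PySem.Int.bxor (anfRef (a.take (2 ^ n))) (anfRef (a.drop (2 ^ n)))]
      from rfl]
    conv_rhs => rw [hxy]
    rw [anfRef_two_pow n _ _ hx hy]

theorem A_outer (n : Nat) (c0 : List (List Int)) (h : c0.length = 2 ^ n) :
    ∀ i, i ≤ n →
    (List.range i).foldl (fun coeffs i =>
      (List.range (2 ^ (n - i - 1))).foldl (fun tmp j =>
        tmp ++ [coeffs.getD (2 * j) [] ++
          List.zipWith PySem.Int.bxor (coeffs.getD (2 * j) []) (coeffs.getD (2 * j + 1) [])]) []) c0 =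
      pairMerge^[i] c0 := by
  intro i
  induction i with
  | zero => intro _; rfl
  | succ i ih =>
    intro hi
    rw [List.range_succ, List.foldl_append, List.foldl_cons, List.foldl_nil, ih (by omega)]
    have hlen : (pairMerge^[i] c0).length = 2 ^ (n - i) :=
      pairMerge_iter_length i (n - i) c0 (by rw [h]; congr 1; omega)
    obtain ⟨m, hm⟩ : ∃ m, n - i = m + 1 := ⟨n - i - 1, by omega⟩
    have hm1 : n - i - 1 = m := by omega
    rw [hm1, inner_eq_pairMerge (2 ^ m) _ (by rw [hlen, hm, Nat.pow_succ]; omega),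
      ← Function.iterate_succ_apply' pairMerge i c0]


-- ---- validation arithmetic ----

theorem pyBinDigits_two_pow_length (p : Nat) : (pyBinDigits (2 ^ p)).length = p + 1 := by
  induction p with
  | zero =>
    rw [pow_zero, pyBinDigits, dif_neg (by norm_num), pyBinDigits]
    rfl
  | succ p ih =>
    have hne : (2 : Nat) ^ (p + 1) ≠ 0 := (Nat.two_pow_pos (p + 1)).ne'
    have hdiv : 2 ^ (p + 1) / 2 = 2 ^ p := by rw [Nat.pow_succ]; omega
    rw [pyBinDigits, dif_neg hne, hdiv, List.length_append, ih]
    rfl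

-- ===== VERDICT (by name: the statement is the Claim_ definition above) =====
theorem anf_coeffs_spec : Claim_equal_anf_coeffs := by
  intro tv _ hpre
  obtain ⟨hne, hlen⟩ := hpre
  set p := Nat.log2 tv.length with hp
  have hne0 : tv.length ≠ 0 := fun h => hne (List.eq_nil_of_length_eq_zero h)
  have hs : (pyBinStr tv.length).length - 1 = p := by
    rw [pyBinStr, if_neg hne0, hlen, pyBinDigits_two_pow_length]
    omega
  have hguard : ¬ (tv.length ≠ 2 ^ ((pyBinStr tv.length).length - 1)) := by
    rw [hs, ← hlen]
    exact not_ne_iff.mpr rfl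
  unfold Spec_anf_coeffs anf_coeffs anf_coeffs_alt
  simp only [hs]
  have hc0 : (tv.map (fun v => [v])).length = 2 ^ p := by rw [List.length_map, hlen]
  rw [A_outer p _ hc0 p le_rfl, pairMerge_iter_ref p tv hlen]
  rw [altLoop_eq p 0 tv (by rw [hlen, Nat.zero_add]),
    show List.range' 0 p = List.range p from List.range_eq_range'.symm,
    B_eq_ref p tv hlen]
  rfl
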